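-- pv_equiv track=rewrite | github.com/tzhu67/UIC_mcs320_fall2023 | oneLumpSnake_v2.py | oneLump
-- ===== SOURCE A (Python) =====
-- def oneLump(n, seqs = []):
--     """
--     Generate all one-lump sequences of length n.
--     Start with [n], attach m = n-1, n-2, ..., 1 at left or right of current sequences, 2^(n-1) many sequences in total.
--     """
--     if len(seqs) == 0:
--         return oneLump(n-1, [[n]])
--     elif n == 0:
--         return [[(i+1,seq[i]) for i in range(len(seq))] for seq in seqs]
--     else:
--         seqs1 = [[n]+seq for seq in seqs]
--         seqs2 = [seq+[n] for seq in seqs]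
--         return oneLump(n-1, seqs1+seqs2)
-- ===== SOURCE B (Python) =====
-- def oneLump(n, seqs=[]):
--     if len(seqs) == 0:
--         seqs = [[n]]
--         n -= 1
--     for m in range(n, 0, -1):
--         seqs = [[m] + s for s in seqs] + [s + [m] for s in seqs]
--     return [[(i + 1, v) for i, v in enumerate(s)] for s in seqs]
-- ===== Notes on version B (the rewrite author's own statement) =====
-- stated objective: simpler
-- what changed: Replaced the tail recursion with an iterative for-loop over range(n,0,-1) on a rebound accumulator, and the index-based base-case conversion with enumerate.
import Mathlib
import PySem

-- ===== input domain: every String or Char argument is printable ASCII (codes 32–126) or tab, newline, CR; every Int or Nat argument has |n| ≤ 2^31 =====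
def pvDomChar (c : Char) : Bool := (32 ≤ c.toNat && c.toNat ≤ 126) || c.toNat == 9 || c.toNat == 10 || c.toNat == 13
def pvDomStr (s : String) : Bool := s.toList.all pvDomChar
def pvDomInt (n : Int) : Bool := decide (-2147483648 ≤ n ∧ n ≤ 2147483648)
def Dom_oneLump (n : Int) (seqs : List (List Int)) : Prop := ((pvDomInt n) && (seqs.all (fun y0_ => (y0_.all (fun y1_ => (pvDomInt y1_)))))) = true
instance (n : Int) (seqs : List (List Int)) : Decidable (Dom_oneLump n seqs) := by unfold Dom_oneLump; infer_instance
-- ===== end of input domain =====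

-- B replaces A's tail recursion with an iterative loop over range(n,0,-1) and an
-- enumerate-based final conversion; same return values on Pre_ (objective: simpler).

-- ===== PORT A =====
-- literal port of A; the final 'else []' arm is unreachable under Pre_ (Python recurses
-- forever there, doubling seqs each level) and exists only to make the recursion total
def oneLump (n : Int) (seqs : List (List Int)) : List (List (Int × Int)) :=
  if _h : seqs.length = 0 then
    oneLump (n - 1) [[n]]
  else if n = 0 then
    seqs.map (fun seq =>
      (PySem.List.pyRange 0 (seq.length : Int) 1).map
        (fun i => (i + 1, PySem.List.pyGetD seq i 0)))  -- index i always in range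
  else if _h2 : 0 < n then
    let seqs1 := seqs.map (fun seq => n :: seq)
    let seqs2 := seqs.map (fun seq => seq ++ [n])
    oneLump (n - 1) (seqs1 ++ seqs2)
  else []
termination_by (if seqs.length = 0 then n.toNat + 1 else n.toNat)
decreasing_by
  · simp only [List.length_cons, List.length_nil, _h]
    norm_num
  · have h2 : ¬ (seqs.length + seqs.length = 0) := by omega
    simp only [List.length_append, List.length_map, List.length_attach, h2, _h, if_false]
    omega

-- ===== PORT B =====
def oneLump_alt (n : Int) (seqs : List (List Int)) : List (List (Int × Int)) :=
  let p := if seqs.isEmpty then (n - 1, [[n]]) else (n, seqs)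
  let final := (PySem.List.pyRange p.1 0 (-1)).foldl
    (fun acc m => acc.map (fun s => m :: s) ++ acc.map (fun s => s ++ [m])) p.2
  final.map (fun s => (PySem.List.enumerate s).map (fun iv => (iv.1 + 1, iv.2)))

-- ===== PRECONDITION & SPEC =====
-- Pre_ excludes exactly the inputs where Python A never returns (it recurses forever,
-- raising RecursionError / exhausting memory): n ≤ 0 with empty seqs, n < 0 otherwise.
def Pre_oneLump (n : Int) (seqs : List (List Int)) : Prop :=
  (seqs = [] → 1 ≤ n) ∧ (seqs ≠ [] → 0 ≤ n)
instance (n : Int) (seqs : List (List Int)) : Decidable (Pre_oneLump n seqs) := by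
  unfold Pre_oneLump; infer_instance

def pvWitness_oneLump : Int × List (List Int) := (3, [])

def Spec_oneLump (n : Int) (seqs : List (List Int)) (out : List (List (Int × Int))) : Prop := out = oneLump_alt n seqs
instance (n : Int) (seqs : List (List Int)) (out : List (List (Int × Int))) : Decidable (Spec_oneLump n seqs out) := by unfold Spec_oneLump; infer_instance

-- ===== CLAIM (what is proved, stated in full; the proofs are below) =====
def Claim_equal_oneLump : Prop := ∀ (n : Int) (seqs : List (List Int)), Dom_oneLump n seqs → Pre_oneLump n seqs → Spec_oneLump n seqs (oneLump n seqs)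

-- ===== LEMMAS AND PROOFS =====

-- A's index-based conversion of one sequence equals B's enumerate-based conversion.
lemma enum_conv (seq : List Int) (s : Int) :
    (PySem.List.enumerate seq s).map (fun iv => (iv.1 + 1, iv.2)) =
      (PySem.List.pyRange 0 (seq.length : Int) 1).map
        (fun i => (i + 1 + s, PySem.List.pyGetD seq i 0)) := by
  induction seq generalizing s with
  | nil => simp [PySem.List.enumerate_nil, PySem.List.pyRange_one_eq_nil]
  | cons x xs ih =>
    rw [PySem.List.enumerate_cons, PySem.List.pyRange_one_cons (by simp)]
    simp only [List.map_cons]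
    congr 1
    · simp [PySem.List.pyGetD_zero_cons]; ring
    · rw [ih (s + 1)]
      simp only [PySem.List.pyRange_one, List.map_map, List.length_cons]
      push_cast
      have harg : ((xs.length : Int) + 1 - 1).toNat = ((xs.length : Int) - 0).toNat := by
        omega
      rw [harg]
      apply List.map_congr_left
      intro k hk
      simp only [Function.comp]
      have e1 : (0 : Int) + (k : Int) = ((k : Nat) : Int) := by ring
      have e2 : (1 + (k : Int)) = (((k + 1 : Nat)) : Int) := by push_cast; ring
      rw [e1, e2]
      simp only [PySem.List.pyGetD_natCast, Prod.mk.injEq]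
      refine ⟨by push_cast; ring, ?_⟩
      simp

lemma conv_eq (seq : List Int) :
    (PySem.List.pyRange 0 (seq.length : Int) 1).map
        (fun i => (i + 1, PySem.List.pyGetD seq i 0)) =
      (PySem.List.enumerate seq).map (fun iv => (iv.1 + 1, iv.2)) := by
  rw [enum_conv seq 0]
  apply List.map_congr_left; intro i _; simp

-- the loop invariant: for nonnegative n and nonempty seqs, A's recursion equals
-- B's fold over pyRange n 0 (-1) followed by the enumerate conversion
lemma loop_eq (k : Nat) (seqs : List (List Int)) (hne : seqs ≠ []) :
    oneLump (k : Int) seqs =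
      ((PySem.List.pyRange (k : Int) 0 (-1)).foldl
        (fun acc m => acc.map (fun s => m :: s) ++ acc.map (fun s => s ++ [m])) seqs).map
        (fun s => (PySem.List.enumerate s).map (fun iv => (iv.1 + 1, iv.2))) := by
  induction k generalizing seqs with
  | zero =>
    rw [oneLump]
    have h0 : ¬ (seqs.length = 0) := by simpa using hne
    simp only [Nat.cast_zero, h0]
    norm_num [PySem.List.pyRange_neg_one_eq_nil]
    exact fun a _ => conv_eq a
  | succ m ih =>
    rw [oneLump]
    have h0 : ¬ (seqs.length = 0) := by simpa using hne
    have hc1 : ¬ (((m + 1 : Nat) : Int) = 0) := by push_cast; omega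
    have hc2 : (0 : Int) < ((m + 1 : Nat) : Int) := by push_cast; omega
    rw [dif_neg h0, if_neg hc1, dif_pos hc2]
    dsimp only
    rw [PySem.List.pyRange_neg_one_cons (by push_cast; omega), List.foldl_cons]
    have hsub : (((m + 1 : Nat) : Int) - 1) = (m : Int) := by push_cast; ring
    rw [hsub]
    exact ih _ (by simp [hne])

-- ===== VERDICT (by name: the statement is the Claim_ definition above) =====
theorem oneLump_spec : Claim_equal_oneLump := by
  intro n seqs _ hpre
  unfold Spec_oneLump oneLump_alt
  by_cases h : seqs = []
  · subst h
    have hn : 1 ≤ n := hpre.1 rfl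
    rw [oneLump]
    simp only [List.length_nil, List.isEmpty_nil, dite_true, ite_true]
    have hcast : n - 1 = ((n - 1).toNat : Int) := by omega
    rw [hcast]
    exact loop_eq (n - 1).toNat [[n]] (by simp)
  · have hn : 0 ≤ n := hpre.2 h
    have hE : seqs.isEmpty = false := by simpa using h
    simp only [hE, Bool.false_eq_true, if_false]
    have hcast : n = (n.toNat : Int) := by omega
    rw [hcast]
    exact loop_eq n.toNat seqs h
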